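-- pv_equiv track=rewrite | github.com/Aaryan25/DNP_Programming | II_Hartals.py | check
-- ===== SOURCE A (Python) =====
-- def check(n, p, hartals):
--     lost = 0
--     for i in range(1, n+1):
--         if i % 7 == 6 or i % 7 == 0:
--             pass
--         else:
--             for j in range(p):
--                 if i % hartals[j] == 0:
--                     lost += 1
--                     break
--     return lost
-- ===== SOURCE B (Python) =====
-- def check(n, p, hartals):
--     # Sieve: mark every hartal day once, then count non-weekend marked days.
--     hit = set()
--     for j in range(p):
--         h = abs(hartals[j])
--         hit.update(range(h, n + 1, h))
--     lost = 0
--     for i in range(1, n + 1):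
--         if i % 7 != 6 and i % 7 != 0 and i in hit:
--             lost += 1
--     return lost
-- ===== Notes on version B (the rewrite author's own statement) =====
-- stated objective: faster
-- what changed: Instead of testing every day against every hartal period with an inner break-loop, B sieves: it marks the multiples of each period once in a set and then counts non-weekend marked days in a single pass.
-- outside the precondition, e.g. on check(0, 1, []): A returns 0, B raises IndexError; on check(3, 2, [1, 0]): A returns 3, B raises ValueError
import Mathlib
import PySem

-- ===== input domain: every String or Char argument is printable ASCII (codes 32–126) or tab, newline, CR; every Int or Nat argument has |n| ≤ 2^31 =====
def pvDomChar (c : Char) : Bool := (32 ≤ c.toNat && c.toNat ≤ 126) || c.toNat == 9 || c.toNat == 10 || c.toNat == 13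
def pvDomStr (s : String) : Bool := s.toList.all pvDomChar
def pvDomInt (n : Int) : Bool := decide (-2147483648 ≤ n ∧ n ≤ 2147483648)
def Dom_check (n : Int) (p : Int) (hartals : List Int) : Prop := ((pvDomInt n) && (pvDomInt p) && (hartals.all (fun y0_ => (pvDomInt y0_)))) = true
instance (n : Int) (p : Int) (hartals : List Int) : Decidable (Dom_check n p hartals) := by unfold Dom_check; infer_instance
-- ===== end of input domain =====

-- B replaces A's per-day scan of all p periods by a sieve (mark multiples of each
-- period once in a set, then one counting pass): an asymptotic speed-up.


-- ===== PORT A =====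
-- inner 'for j in range(p): if i % hartals[j] == 0: lost += 1; break'
-- (returns the contribution 0 or 1; pyGetD's default is never reached under Pre_)
def checkInner (i : Int) (hartals : List Int) : List Int → Int
  | [] => 0
  | j :: rest =>
      if PySem.Int.mod i (PySem.List.pyGetD hartals j 1) = 0 then 1
      else checkInner i hartals rest

def check (n : Int) (p : Int) (hartals : List Int) : Int :=
  (PySem.List.pyRange 1 (n + 1) 1).foldl
    (fun lost i =>
      if PySem.Int.mod i 7 = 6 ∨ PySem.Int.mod i 7 = 0 then lost
      else lost + checkInner i hartals (PySem.List.pyRange 0 p 1))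
    0

-- ===== PORT B =====
def check_alt (n : Int) (p : Int) (hartals : List Int) : Int :=
  let hit : PySem.Set Int :=
    (PySem.List.pyRange 0 p 1).foldl
      (fun s j =>
        let h := |PySem.List.pyGetD hartals j 1|
        PySem.Set.update s (PySem.List.pyRange h (n + 1) h))
      PySem.Set.empty
  (PySem.List.pyRange 1 (n + 1) 1).foldl
    (fun lost i =>
      if PySem.Int.mod i 7 ≠ 6 ∧ PySem.Int.mod i 7 ≠ 0 ∧ PySem.Set.contains hit i then
        lost + 1
      else lost)
    0

-- ===== PRECONDITION & SPEC =====
-- Pre_ excludes inputs on which Python B raises: an out-of-range index j < p (A may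
-- still return when n < 1 or an earlier period always breaks first) and a zero period
-- among the first p (A may still return when a zero is never reached before a break).
def Pre_check (n : Int) (p : Int) (hartals : List Int) : Prop :=
  p ≤ (hartals.length : Int) ∧ ∀ h ∈ hartals.take p.toNat, h ≠ 0

instance (n : Int) (p : Int) (hartals : List Int) : Decidable (Pre_check n p hartals) := by
  unfold Pre_check; infer_instance

def pvWitness_check : Int × Int × List Int := (20, 2, [3, 5])

def Spec_check (n : Int) (p : Int) (hartals : List Int) (out : Int) : Prop := out = check_alt n p hartals
instance (n : Int) (p : Int) (hartals : List Int) (out : Int) : Decidable (Spec_check n p hartals out) := by unfold Spec_check; infer_instance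

-- ===== CLAIM (what is proved, stated in full; the proofs are below) =====
def Claim_equal_check : Prop := ∀ (n : Int) (p : Int) (hartals : List Int), Dom_check n p hartals → Pre_check n p hartals → Spec_check n p hartals (check n p hartals)

-- ===== LEMMAS AND PROOFS =====

-- A's inner loop: 1 iff some listed index j has hartals[j] dividing i.
theorem checkInner_eq_one_iff (i : Int) (hartals : List Int) (js : List Int) :
    checkInner i hartals js = if (∃ j ∈ js, PySem.Int.mod i (PySem.List.pyGetD hartals j 1) = 0) then 1 else 0 := by
  induction js with
  | nil => simp [checkInner]
  | cons j rest ih =>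
      by_cases h : PySem.Int.mod i (PySem.List.pyGetD hartals j 1) = 0
      · simp [checkInner, h]
      · simp [checkInner, h, ih]

-- B's marked set: membership is "some index j < p marks i".
theorem mem_hit_iff (n p : Int) (hartals : List Int) (i : Int) :
    (i ∈ (PySem.List.pyRange 0 p 1).foldl
      (fun s j =>
        PySem.Set.update s (PySem.List.pyRange (|PySem.List.pyGetD hartals j 1|) (n + 1)
          (|PySem.List.pyGetD hartals j 1|)))
      PySem.Set.empty)
    ↔ ∃ j ∈ PySem.List.pyRange 0 p 1,
        i ∈ PySem.List.pyRange (|PySem.List.pyGetD hartals j 1|) (n + 1)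
              (|PySem.List.pyGetD hartals j 1|) := by
  have gen : ∀ (js : List Int) (s : PySem.Set Int),
      (i ∈ js.foldl (fun s j =>
        PySem.Set.update s (PySem.List.pyRange (|PySem.List.pyGetD hartals j 1|) (n + 1)
          (|PySem.List.pyGetD hartals j 1|))) s)
      ↔ i ∈ s ∨ ∃ j ∈ js, i ∈ PySem.List.pyRange (|PySem.List.pyGetD hartals j 1|) (n + 1)
              (|PySem.List.pyGetD hartals j 1|) := by
    intro js
    induction js with
    | nil => simp
    | cons j rest ih =>
        intro s
        simp only [List.foldl_cons, ih, PySem.Set.mem_update, List.mem_cons]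
        constructor
        · rintro (⟨hs | hr⟩ | ⟨k, hk, hm⟩)
          · exact Or.inl hs
          · exact Or.inr ⟨j, Or.inl rfl, hr⟩
          · exact Or.inr ⟨k, Or.inr hk, hm⟩
        · rintro (hs | ⟨k, (rfl | hk), hm⟩)
          · exact Or.inl (Or.inl hs)
          · exact Or.inl (Or.inr hm)
          · exact Or.inr ⟨k, hk, hm⟩
  simpa using gen (PySem.List.pyRange 0 p 1) PySem.Set.empty

-- For a nonzero period h and a day 1 ≤ i ≤ n, being a marked multiple is exactly i % h == 0.
theorem mem_markRange_iff (h i n : Int) (hh : h ≠ 0) (hi1 : 1 ≤ i) (hin : i ≤ n) :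
    i ∈ PySem.List.pyRange (|h|) (n + 1) (|h|) ↔ PySem.Int.mod i h = 0 := by
  have hpos : 0 < |h| := abs_pos.mpr hh
  rw [PySem.List.mem_pyRange_iff_of_pos hpos]
  rw [PySem.Int.mod_eq_zero_iff_dvd]
  constructor
  · rintro ⟨hle, _, hdvd⟩
    have habs : |h| ∣ i := by
      have := dvd_add hdvd (dvd_refl (|h|))
      simpa using this
    exact (abs_dvd _ _).mp habs
  · intro hdvd
    have habs : |h| ∣ i := (abs_dvd _ _).mpr hdvd
    refine ⟨Int.le_of_dvd (by omega) habs, by omega, dvd_sub habs (dvd_refl _)⟩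

-- Under Pre_, every index j ∈ range(0,p) fetches a nonzero period.
theorem pyGetD_ne_zero (p : Int) (hartals : List Int)
    (hpre : Pre_check 0 p hartals) (j : Int) (hj : j ∈ PySem.List.pyRange 0 p 1) :
    PySem.List.pyGetD hartals j 1 ≠ 0 := by
  obtain ⟨hlen, hnz⟩ := hpre
  rw [PySem.List.mem_pyRange_one] at hj
  have hjn : (j.toNat : Int) = j := Int.toNat_of_nonneg hj.1
  have hjlt : j.toNat < hartals.length := by omega
  have hget := PySem.List.pyGetD_natCast hartals j.toNat 1
  rw [hjn] at hget
  rw [hget, List.getD_eq_getElem hartals 1 hjlt]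
  apply hnz
  rw [List.mem_take_iff_getElem]
  exact ⟨j.toNat, by omega, rfl⟩

theorem check_eq_alt (n p : Int) (hartals : List Int) (hpre : Pre_check n p hartals) :
    check n p hartals = check_alt n p hartals := by
  unfold check check_alt
  apply PySem.List.foldl_congr_mem
  intro acc i hi
  rw [PySem.List.mem_pyRange_one] at hi
  have hpre0 : Pre_check 0 p hartals := hpre
  by_cases hw : PySem.Int.mod i 7 = 6 ∨ PySem.Int.mod i 7 = 0
  · rw [if_pos hw, if_neg]
    rintro ⟨h6, h0, -⟩
    rcases hw with hw | hw
    · exact h6 hw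
    · exact h0 hw
  · rw [if_neg hw]
    have hw' : PySem.Int.mod i 7 ≠ 6 ∧ PySem.Int.mod i 7 ≠ 0 := by tauto
    rw [checkInner_eq_one_iff]
    have hmem : (PySem.Set.contains
        ((PySem.List.pyRange 0 p 1).foldl
          (fun s j =>
            PySem.Set.update s (PySem.List.pyRange (|PySem.List.pyGetD hartals j 1|) (n + 1)
              (|PySem.List.pyGetD hartals j 1|)))
          PySem.Set.empty) i) = true
        ↔ ∃ j ∈ PySem.List.pyRange 0 p 1,
            PySem.Int.mod i (PySem.List.pyGetD hartals j 1) = 0 := by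
      rw [PySem.Set.contains_iff, mem_hit_iff]
      constructor
      · rintro ⟨j, hj, hm⟩
        exact ⟨j, hj, (mem_markRange_iff _ _ _ (pyGetD_ne_zero p hartals hpre0 j hj)
          (by omega) (by omega)).mp hm⟩
      · rintro ⟨j, hj, hm⟩
        exact ⟨j, hj, (mem_markRange_iff _ _ _ (pyGetD_ne_zero p hartals hpre0 j hj)
          (by omega) (by omega)).mpr hm⟩
    by_cases hx : ∃ j ∈ PySem.List.pyRange 0 p 1, PySem.Int.mod i (PySem.List.pyGetD hartals j 1) = 0
    · rw [if_pos hx, if_pos ⟨hw'.1, hw'.2, hmem.mpr hx⟩]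
    · rw [if_neg hx, if_neg (fun hcon => hx (hmem.mp hcon.2.2))]
      omega

-- ===== VERDICT (by name: the statement is the Claim_ definition above) =====
theorem check_spec : Claim_equal_check := by
  intro n p hartals _ hpre
  unfold Spec_check
  exact check_eq_alt n p hartals hpre
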